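-- pv_equiv track=rewrite | github.com/irfaniskandar-23/Python-Fundamentals | simple_challenge/solution.py | get_total_sale
-- ===== SOURCE A (Python) =====
-- def get_total_sale(daily_sale):
--     sale_item_A = sale_item_B = sale_item_C = sale_item_D = 0
--     for items in daily_sale.values():
--         if 'Item_A' in items:
--             sale_item_A += items['Item_A']
--
--         if 'Item_B' in items:
--             sale_item_B += items['Item_B']
--
--         if 'Item_C' in items:
--             sale_item_C += items['Item_C']
--
--         if 'Item_D' in items:
--             sale_item_D += items['Item_D']
--
--     item_sale_dict = {
--         'Item_A': sale_item_A,
--         'Item_B': sale_item_B,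
--         'Item_C': sale_item_C,
--         "item_D": sale_item_D
--     }
--
--     return item_sale_dict
-- ===== SOURCE B (Python) =====
-- def get_total_sale(daily_sale):
--     values = daily_sale.values()
--     return {
--         'Item_A': sum(items['Item_A'] for items in values if 'Item_A' in items),
--         'Item_B': sum(items['Item_B'] for items in values if 'Item_B' in items),
--         'Item_C': sum(items['Item_C'] for items in values if 'Item_C' in items),
--         "item_D": sum(items['Item_D'] for items in values if 'Item_D' in items),
--     }
-- ===== Notes on version B (the rewrite author's own statement) =====
-- stated objective: simpler
-- what changed: Replaces A's single row-wise loop carrying four accumulator variables by four independent column-wise generator-sums over daily_sale.values(), returning the dict literal directly (preserving A's 'item_D' key spelling).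
import Mathlib
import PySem

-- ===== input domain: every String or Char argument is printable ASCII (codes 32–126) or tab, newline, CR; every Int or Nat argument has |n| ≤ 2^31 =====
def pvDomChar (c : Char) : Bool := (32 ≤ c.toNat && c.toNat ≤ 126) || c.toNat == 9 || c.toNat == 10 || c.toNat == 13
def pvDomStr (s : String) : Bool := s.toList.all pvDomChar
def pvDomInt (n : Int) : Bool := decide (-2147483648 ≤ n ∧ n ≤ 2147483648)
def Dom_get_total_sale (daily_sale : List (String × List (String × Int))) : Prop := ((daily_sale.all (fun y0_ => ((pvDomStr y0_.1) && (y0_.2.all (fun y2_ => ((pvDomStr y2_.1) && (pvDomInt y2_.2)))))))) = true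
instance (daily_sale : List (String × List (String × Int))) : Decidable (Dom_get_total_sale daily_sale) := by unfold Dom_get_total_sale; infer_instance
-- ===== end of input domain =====

-- B replaces A's single row-wise loop with four accumulators by four independent
-- column-wise generator-sums over the values (objective: simpler decomposition).

-- ===== PORT A =====
-- A's single pass over daily_sale.values(), carrying the four running totals.
def get_total_sale (daily_sale : List (String × List (String × Int))) : List (String × Int) :=
  let s := daily_sale.foldl (fun (s : Int × Int × Int × Int) kv =>
    let items := kv.2
    let a := match items.lookup "Item_A" with | some v => s.1 + v | none => s.1
    let b := match items.lookup "Item_B" with | some v => s.2.1 + v | none => s.2.1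
    let c := match items.lookup "Item_C" with | some v => s.2.2.1 + v | none => s.2.2.1
    let d := match items.lookup "Item_D" with | some v => s.2.2.2 + v | none => s.2.2.2
    (a, b, c, d)) (0, 0, 0, 0)
  [("Item_A", s.1), ("Item_B", s.2.1), ("Item_C", s.2.2.1), ("item_D", s.2.2.2)]

-- ===== PORT B =====
-- one generator-sum: sum(items[key] for items in values if key in items)
def colSum (values : List (List (String × Int))) (key : String) : Int :=
  (values.filterMap (fun items => items.lookup key)).sum

def get_total_sale_alt (daily_sale : List (String × List (String × Int))) : List (String × Int) :=
  let values := daily_sale.map Prod.snd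
  [("Item_A", colSum values "Item_A"),
   ("Item_B", colSum values "Item_B"),
   ("Item_C", colSum values "Item_C"),
   ("item_D", colSum values "Item_D")]

-- ===== PRECONDITION & SPEC =====
def Spec_get_total_sale (daily_sale : List (String × List (String × Int))) (out : List (String × Int)) : Prop := out = get_total_sale_alt daily_sale
instance (daily_sale : List (String × List (String × Int))) (out : List (String × Int)) : Decidable (Spec_get_total_sale daily_sale out) := by unfold Spec_get_total_sale; infer_instance

-- ===== CLAIM (what is proved, stated in full; the proofs are below) =====
def Claim_equal_get_total_sale : Prop := ∀ (daily_sale : List (String × List (String × Int))), Dom_get_total_sale daily_sale → Spec_get_total_sale daily_sale (get_total_sale daily_sale)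

-- ===== LEMMAS AND PROOFS =====
-- A's fold, started from (a,b,c,d), lands at the four column sums shifted by (a,b,c,d).
theorem foldl_eq_colSums (l : List (String × List (String × Int)))
    (a b c d : Int) :
    l.foldl (fun (s : Int × Int × Int × Int) kv =>
      let items := kv.2
      let a := match items.lookup "Item_A" with | some v => s.1 + v | none => s.1
      let b := match items.lookup "Item_B" with | some v => s.2.1 + v | none => s.2.1
      let c := match items.lookup "Item_C" with | some v => s.2.2.1 + v | none => s.2.2.1
      let d := match items.lookup "Item_D" with | some v => s.2.2.2 + v | none => s.2.2.2
      (a, b, c, d)) (a, b, c, d)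
    = (a + colSum (l.map Prod.snd) "Item_A",
       b + colSum (l.map Prod.snd) "Item_B",
       c + colSum (l.map Prod.snd) "Item_C",
       d + colSum (l.map Prod.snd) "Item_D") := by
  induction l generalizing a b c d with
  | nil => simp [colSum]
  | cons kv t ih =>
      simp only [List.foldl_cons, ih, List.map_cons]
      unfold colSum
      cases h1 : kv.2.lookup "Item_A" <;> cases h2 : kv.2.lookup "Item_B" <;>
        cases h3 : kv.2.lookup "Item_C" <;> cases h4 : kv.2.lookup "Item_D" <;>
        simp [List.filterMap_cons, h1, h2, h3, h4] <;> ring_nf <;> simp [add_comm, add_left_comm]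

-- ===== VERDICT (by name: the statement is the Claim_ definition above) =====
theorem get_total_sale_spec : Claim_equal_get_total_sale := by
  intro daily_sale _
  unfold Spec_get_total_sale get_total_sale get_total_sale_alt
  simp only [foldl_eq_colSums, zero_add]
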